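-- pv_equiv track=rewrite | github.com/Lulinguaskill/UniprotRetriever-main | src/Compare_prot.py | compte_score
-- ===== SOURCE A (Python) =====
-- def compte_score(prot_i, prot_ref):
--     # Initialiser le nombre de lettres côte à côte
--     count = 0
--     # Parcourir les deux chaînes simultanément jusqu'à ce que l'une d'elles soit entièrement parcourue
--     ind = 0
--     while ind < len(prot_i) and ind < len(prot_ref):
--         # Vérifier si les caractères actuels sont les mêmes et différents de '-'
--         if prot_i[ind] == prot_ref[ind] and prot_i[ind] != '-':
--             # Augmenter le nombre de lettres côte à côte
--             count += 1
--             # Chercher combien de caractères identiques suivent à la suite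
--             while (ind+1 < len(prot_i) and ind+1 < len(prot_ref)) and prot_i[ind+1] == prot_ref[ind+1] and prot_i[ind+1] != '-':
--                 count += 1
--                 ind += 1
--             return count
--         # Passer au caractère suivant
--         ind += 1
--     return count
-- ===== SOURCE B (Python) =====
-- def compte_score(prot_i, prot_ref):
--     # Stage 1: one boolean mask of aligned-match positions.
--     matches = [a == b and a != '-' for a, b in zip(prot_i, prot_ref)]
--     # Stage 2: pure index arithmetic on the mask.
--     if True not in matches:
--         return 0
--     rest = matches[matches.index(True):]
--     if False not in rest:
--         return len(rest)
--     return rest.index(False)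
-- ===== Notes on version B (the rewrite author's own statement) =====
-- stated objective: alternative
-- what changed: B first materialises a boolean mask of matching non-gap positions over the zipped strings, then computes the answer by index arithmetic on the mask (position of first True, position of first False in the tail slice) using list membership/index/slice built-ins, replacing A's character-scanning outer loop and counting inner while.
import Mathlib
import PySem

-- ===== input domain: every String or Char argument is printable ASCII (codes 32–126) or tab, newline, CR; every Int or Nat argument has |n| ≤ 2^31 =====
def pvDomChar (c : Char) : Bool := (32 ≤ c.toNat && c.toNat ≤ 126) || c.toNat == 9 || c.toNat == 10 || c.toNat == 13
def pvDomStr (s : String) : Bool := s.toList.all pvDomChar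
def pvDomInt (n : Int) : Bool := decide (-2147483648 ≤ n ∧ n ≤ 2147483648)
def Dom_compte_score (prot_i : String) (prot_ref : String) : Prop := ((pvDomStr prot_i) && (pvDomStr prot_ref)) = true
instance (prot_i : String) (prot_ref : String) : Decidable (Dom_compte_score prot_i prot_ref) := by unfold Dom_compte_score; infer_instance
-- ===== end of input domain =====

-- B builds a boolean mask of matching non-gap positions once, then answers by index
-- arithmetic on the mask (first True, first False after it) instead of A's scanning
-- outer loop plus counting inner while (objective: alternative).


-- ===== PORT A =====
-- inner while loop of A: extends the run starting after index ind
def csInner (li lr : List Char) (ind : Nat) (count : Int) : Int :=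
  if h : ind + 1 < li.length ∧ ind + 1 < lr.length ∧
      li.getD (ind+1) ' ' = lr.getD (ind+1) ' ' ∧ li.getD (ind+1) ' ' ≠ '-' then
    csInner li lr (ind+1) (count+1)
  else count
termination_by li.length - ind
decreasing_by omega

-- outer while loop of A: scans for the first matching position
def csOuter (li lr : List Char) (ind : Nat) : Int :=
  if h : ind < li.length ∧ ind < lr.length then
    if li.getD ind ' ' = lr.getD ind ' ' ∧ li.getD ind ' ' ≠ '-' then
      csInner li lr ind 1
    else csOuter li lr (ind+1)
  else 0
termination_by li.length - ind
decreasing_by omega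

def compte_score (prot_i : String) (prot_ref : String) : Int :=
  csOuter prot_i.toList prot_ref.toList 0

-- ===== PORT B =====
-- 'matches' comprehension of Source B: boolean mask over the zipped characters
def csMask (li lr : List Char) : List Bool :=
  (li.zip lr).map (fun p => decide (p.1 = p.2 ∧ p.1 ≠ '-'))

def compte_score_alt (prot_i : String) (prot_ref : String) : Int :=
  let m := csMask prot_i.toList prot_ref.toList
  if m.contains true then
    -- matches[matches.index(True):] — start is in range, so the slice is List.drop
    let rest := m.drop ((PySem.List.index? m true).getD 0)
    if rest.contains false then (((PySem.List.index? rest false).getD 0 : Nat) : Int)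
    else (rest.length : Int)
  else 0

-- ===== PRECONDITION & SPEC =====
def Spec_compte_score (prot_i : String) (prot_ref : String) (out : Int) : Prop := out = compte_score_alt prot_i prot_ref
instance (prot_i : String) (prot_ref : String) (out : Int) : Decidable (Spec_compte_score prot_i prot_ref out) := by unfold Spec_compte_score; infer_instance

-- ===== CLAIM (what is proved, stated in full; the proofs are below) =====
def Claim_equal_compte_score : Prop := ∀ (prot_i : String) (prot_ref : String), Dom_compte_score prot_i prot_ref → Spec_compte_score prot_i prot_ref (compte_score prot_i prot_ref)

-- ===== LEMMAS AND PROOFS =====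

-- leading-match count on the remaining lists (structural view of A's inner loop)
def csRun : List Char → List Char → Int
  | a :: as, b :: bs => if a = b ∧ a ≠ '-' then 1 + csRun as bs else 0
  | _, _ => 0

-- structural view of A's outer loop
def csScan : List Char → List Char → Int
  | a :: as, b :: bs => if a = b ∧ a ≠ '-' then 1 + csRun as bs else csScan as bs
  | _, _ => 0

lemma csInner_eq (li lr : List Char) (ind : Nat) (count : Int) :
    csInner li lr ind count = count + csRun (li.drop (ind+1)) (lr.drop (ind+1)) := by
  induction ind, count using csInner.induct li lr with
  | case1 ind count h ih =>
    obtain ⟨h1, h2, h3, h4⟩ := h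
    rw [csInner, dif_pos ⟨h1, h2, h3, h4⟩, ih,
        List.drop_eq_getElem_cons h1, List.drop_eq_getElem_cons h2]
    simp only [List.getD_eq_getElem?_getD, List.getElem?_eq_getElem h1,
      List.getElem?_eq_getElem h2, Option.getD_some] at h3 h4
    rw [csRun, if_pos ⟨h3, h4⟩]
    ring
  | case2 ind count h =>
    rw [csInner, dif_neg h]
    rcases Nat.lt_or_ge (ind+1) li.length with h1 | h1
    · rcases Nat.lt_or_ge (ind+1) lr.length with h2 | h2
      · rw [List.drop_eq_getElem_cons h1, List.drop_eq_getElem_cons h2, csRun]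
        have : ¬ (li[ind+1] = lr[ind+1] ∧ li[ind+1] ≠ '-') := by
          intro ⟨ha, hb⟩
          exact h ⟨h1, h2, by
            simp [List.getD_eq_getElem?_getD, List.getElem?_eq_getElem h1,
              List.getElem?_eq_getElem h2, ha], by
            simp [List.getD_eq_getElem?_getD, List.getElem?_eq_getElem h1, hb]⟩
        rw [if_neg this]; ring
      · rw [List.drop_eq_nil_of_le h2]
        cases li.drop (ind+1) <;> simp [csRun]
    · rw [List.drop_eq_nil_of_le h1]; simp [csRun]

lemma csOuter_eq (li lr : List Char) (ind : Nat) :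
    csOuter li lr ind = csScan (li.drop ind) (lr.drop ind) := by
  induction ind using csOuter.induct li lr with
  | case1 ind h hm =>
    obtain ⟨h1, h2⟩ := h
    rw [csOuter, dif_pos ⟨h1, h2⟩, if_pos hm, csInner_eq,
        List.drop_eq_getElem_cons h1, List.drop_eq_getElem_cons h2, csScan]
    obtain ⟨h3, h4⟩ := hm
    simp only [List.getD_eq_getElem?_getD, List.getElem?_eq_getElem h1,
      List.getElem?_eq_getElem h2, Option.getD_some] at h3 h4
    rw [if_pos ⟨h3, h4⟩]
  | case2 ind h hm ih =>
    obtain ⟨h1, h2⟩ := h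
    rw [csOuter, dif_pos ⟨h1, h2⟩, if_neg hm, ih,
        List.drop_eq_getElem_cons h1, List.drop_eq_getElem_cons h2, csScan]
    have : ¬ (li[ind] = lr[ind] ∧ li[ind] ≠ '-') := by
      intro ⟨ha, hb⟩
      exact hm ⟨by
        simp [List.getD_eq_getElem?_getD, List.getElem?_eq_getElem h1,
          List.getElem?_eq_getElem h2, ha], by
        simp [List.getD_eq_getElem?_getD, List.getElem?_eq_getElem h1, hb]⟩
    rw [if_neg this]
  | case3 ind h =>
    rw [csOuter, dif_neg h]
    rcases Nat.lt_or_ge ind li.length with h1 | h1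
    · have h2 : lr.length ≤ ind := by omega
      rw [List.drop_eq_nil_of_le h2]
      cases li.drop ind <;> simp [csScan]
    · rw [List.drop_eq_nil_of_le h1]; simp [csScan]

-- number of leading `true`s in a boolean mask
def csLead : List Bool → Int
  | [] => 0
  | b :: t => if b then 1 + csLead t else 0

-- structural reading of B's index arithmetic, as a function of the mask
def csBAux (m : List Bool) : Int :=
  if m.contains true then
    let rest := m.drop ((PySem.List.index? m true).getD 0)
    if rest.contains false then (((PySem.List.index? rest false).getD 0 : Nat) : Int)
    else (rest.length : Int)
  else 0

-- first-False index (or length) = number of leading trues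
lemma csFalse_eq_lead (m : List Bool) :
    (if m.contains false then (((PySem.List.index? m false).getD 0 : Nat) : Int)
     else (m.length : Int)) = csLead m := by
  induction m with
  | nil => simp [csLead]
  | cons b t ih =>
    cases b with
    | false => simp [csLead]
    | true =>
      rw [PySem.List.index?_cons_of_ne t (by simp)]
      by_cases hf : t.contains false
      · have hmem : false ∈ t := by simpa using hf
        obtain ⟨j, hj⟩ := Option.isSome_iff_exists.mp
          ((PySem.List.index?_isSome_iff t false).mpr hmem)
        rw [if_pos hf] at ih
        simp only [List.contains_cons, hf, Bool.or_true, if_true, hj,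
          Option.map_some, Option.getD_some, csLead]
        rw [PySem.List.index?_eq_idxOf?] at hj
        rw [PySem.List.index?_eq_idxOf?, hj] at ih
        simp [← ih]
        ring
      · rw [if_neg hf] at ih
        have hf' : false ∉ t := by simpa using hf
        have : (true :: t).contains false = false := by simp [hf']
        simp only [this, Bool.false_eq_true, if_false, csLead, if_true]
        rw [← ih]
        push_cast [List.length_cons]
        ring

-- mask reading of A's outer-loop structure
def csScanB : List Bool → Int
  | [] => 0
  | b :: t => if b then 1 + csLead t else csScanB t

lemma csBAux_eq_scanB (m : List Bool) : csBAux m = csScanB m := by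
  induction m with
  | nil => rfl
  | cons b t ih =>
    cases b with
    | true =>
      have hfl := csFalse_eq_lead (true :: t)
      simp only [csLead, if_true] at hfl
      unfold csBAux
      rw [if_pos (by simp), PySem.List.index?_cons_self]
      simp only [Option.getD_some, List.drop_zero, csScanB, if_true]
      exact hfl
    | false =>
      simp only [csScanB, Bool.false_eq_true, if_false]
      rw [← ih]
      by_cases ht : t.contains true
      · have hmem : true ∈ t := by simpa using ht
        obtain ⟨j, hj⟩ := Option.isSome_iff_exists.mp
          ((PySem.List.index?_isSome_iff t true).mpr hmem)
        unfold csBAux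
        rw [PySem.List.index?_cons_of_ne t (by simp), hj,
            if_pos (by simp [hmem]), if_pos ht]
        simp [List.drop_succ_cons]
      · have hmem : true ∉ t := by simpa using ht
        unfold csBAux
        rw [if_neg (by simp [hmem]), if_neg ht]

lemma csLead_mask (li lr : List Char) : csLead (csMask li lr) = csRun li lr := by
  induction li generalizing lr with
  | nil => simp [csMask, csLead, csRun]
  | cons a as ih =>
    cases lr with
    | nil => simp [csMask, csLead, csRun]
    | cons b bs =>
      unfold csMask
      rw [List.zip_cons_cons, List.map_cons, csRun, csLead]
      by_cases hm : a = b ∧ a ≠ '-'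
      · rw [if_pos hm, if_pos (by simp only [decide_eq_true_eq]; exact hm), ← ih bs]
        rfl
      · rw [if_neg hm, if_neg (by simpa using hm)]

lemma csScanB_mask (li lr : List Char) : csScanB (csMask li lr) = csScan li lr := by
  induction li generalizing lr with
  | nil => simp [csMask, csScanB, csScan]
  | cons a as ih =>
    cases lr with
    | nil => simp [csMask, csScanB, csScan]
    | cons b bs =>
      unfold csMask
      rw [List.zip_cons_cons, List.map_cons, csScan, csScanB]
      by_cases hm : a = b ∧ a ≠ '-'
      · rw [if_pos hm, if_pos (by simp only [decide_eq_true_eq]; exact hm), ← csLead_mask as bs]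
        rfl
      · rw [if_neg hm, if_neg (by simpa using hm), ← ih bs]
        rfl

-- ===== VERDICT (by name: the statement is the Claim_ definition above) =====
theorem compte_score_spec : Claim_equal_compte_score := by
  intro prot_i prot_ref _
  unfold Spec_compte_score compte_score compte_score_alt
  rw [csOuter_eq]
  show csScan _ _ = csBAux (csMask prot_i.toList prot_ref.toList)
  rw [csBAux_eq_scanB, csScanB_mask]
  simp
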